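-- pv_equiv track=rewrite | github.com/duckduckdoof/NSA | extended_transformations/utils.py | count_colored_pixels_inside
-- ===== SOURCE A (Python) =====
-- def count_colored_pixels_inside(grid, rectangle):
--     min_r, min_c, max_r, max_c = rectangle
--     count = 0
--     for r in range(min_r, max_r + 1):
--         for c in range(min_c, max_c + 1):
--             if grid[r][c] != 1:
--                 count += 1
--     return count
-- ===== SOURCE B (Python) =====
-- def count_colored_pixels_inside(grid, rectangle):
--     min_r, min_c, max_r, max_c = rectangle
--     if max_r < min_r or max_c < min_c:
--         return 0
--     total = 0
--     for r in range(min_r, max_r + 1):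
--         # prefix sums of the "not 1" indicator over the whole row
--         pref = [0]
--         for v in grid[r]:
--             pref.append(pref[-1] + (v != 1))
--         total += pref[max_c + 1] - pref[min_c]
--     return total
-- ===== Notes on version B (the rewrite author's own statement) =====
-- stated objective: alternative
-- what changed: B short-circuits empty rectangles to 0 and otherwise builds, per visited row, a prefix-sum array of the (!=1) indicator and answers with the difference pref[max_c+1]-pref[min_c], instead of A's nested per-cell loop incrementing on the !=1 test; it trades extra work on the full row for an algebraic prefix-sum formulation.
-- outside the precondition, e.g. on count_colored_pixels_inside([[2]], (0, -1, 0, -1)): A returns 1, B returns -1; on count_colored_pixels_inside([[2, 3]], (0, -2, 0, -1)): A returns 2, B returns -1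
import Mathlib
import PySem

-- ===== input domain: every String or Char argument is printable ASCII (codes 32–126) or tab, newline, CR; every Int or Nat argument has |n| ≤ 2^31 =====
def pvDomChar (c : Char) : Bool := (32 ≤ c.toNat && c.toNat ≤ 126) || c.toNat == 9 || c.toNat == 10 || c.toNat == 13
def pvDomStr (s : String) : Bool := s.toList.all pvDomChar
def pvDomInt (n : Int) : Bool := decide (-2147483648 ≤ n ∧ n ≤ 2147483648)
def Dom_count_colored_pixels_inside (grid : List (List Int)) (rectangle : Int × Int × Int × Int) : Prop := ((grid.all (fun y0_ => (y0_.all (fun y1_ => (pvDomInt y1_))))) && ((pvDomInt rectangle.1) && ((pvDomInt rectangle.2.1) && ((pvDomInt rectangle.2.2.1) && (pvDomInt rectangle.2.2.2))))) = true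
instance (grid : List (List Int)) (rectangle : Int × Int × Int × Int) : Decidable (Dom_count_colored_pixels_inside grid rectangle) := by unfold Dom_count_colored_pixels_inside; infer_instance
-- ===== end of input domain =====

-- B answers via per-row prefix sums of the "not 1" indicator (pref[max_c+1]-pref[min_c]
-- per visited row, empty rectangles short-circuited to 0) instead of A's per-cell test
-- inside a nested loop; objective: alternative. (no side effects)
-- ===== PORT A =====
def count_colored_pixels_inside (grid : List (List Int)) (rectangle : Int × Int × Int × Int) : Int :=
  match rectangle with
  | (min_r, min_c, max_r, max_c) =>
    (PySem.List.pyRange min_r (max_r + 1) 1).foldl (fun count r =>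
      (PySem.List.pyRange min_c (max_c + 1) 1).foldl (fun count c =>
        if PySem.List.pyGetD (PySem.List.pyGetD grid r []) c 1 ≠ 1 then count + 1 else count)
        count) 0

-- ===== PORT B =====
def count_colored_pixels_inside_alt (grid : List (List Int)) (rectangle : Int × Int × Int × Int) : Int :=
  match rectangle with
  | (min_r, min_c, max_r, max_c) =>
    if max_r < min_r ∨ max_c < min_c then 0
    else
      (PySem.List.pyRange min_r (max_r + 1) 1).foldl (fun total r =>
        let pref := (PySem.List.pyGetD grid r []).foldl
          (fun (pref : List Int) v =>
            pref ++ [PySem.List.pyGetD pref (-1) 0 + (if v ≠ 1 then 1 else 0)]) [0]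
        total + PySem.List.pyGetD pref (max_c + 1) 0 - PySem.List.pyGetD pref min_c 0) 0

-- ===== PRECONDITION & SPEC =====
-- Pre_ admits every empty rectangle and every rectangle whose row range is a valid
-- (possibly negatively wrapped, as in Python) index range of grid and whose column range
-- is inside every visited row.  It excludes inputs where A raises IndexError and,
-- deliberately, non-empty rectangles with negative column coordinates, on which A's
-- value comes from Python's negative-index wraparound and is accidental (see cites).
def Pre_count_colored_pixels_inside (grid : List (List Int)) (rectangle : Int × Int × Int × Int) : Prop :=
  match rectangle with
  | (min_r, min_c, max_r, max_c) =>
    max_r < min_r ∨ max_c < min_c ∨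
    (-(grid.length : Int) ≤ min_r ∧ max_r < (grid.length : Int) ∧ 0 ≤ min_c ∧
      ∀ r ∈ PySem.List.pyRange min_r (max_r + 1) 1,
        max_c < ((PySem.List.pyGetD grid r []).length : Int))
instance (grid : List (List Int)) (rectangle : Int × Int × Int × Int) : Decidable (Pre_count_colored_pixels_inside grid rectangle) := by unfold Pre_count_colored_pixels_inside; infer_instance

def pvWitness_count_colored_pixels_inside : List (List Int) × (Int × Int × Int × Int) :=
  ([[1, 2], [3, 1]], (0, 0, 1, 1))

def Spec_count_colored_pixels_inside (grid : List (List Int)) (rectangle : Int × Int × Int × Int) (out : Int) : Prop := out = count_colored_pixels_inside_alt grid rectangle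
instance (grid : List (List Int)) (rectangle : Int × Int × Int × Int) (out : Int) : Decidable (Spec_count_colored_pixels_inside grid rectangle out) := by unfold Spec_count_colored_pixels_inside; infer_instance

-- ===== CLAIM (what is proved, stated in full; the proofs are below) =====
def Claim_equal_count_colored_pixels_inside : Prop := ∀ (grid : List (List Int)) (rectangle : Int × Int × Int × Int), Dom_count_colored_pixels_inside grid rectangle → Pre_count_colored_pixels_inside grid rectangle → Spec_count_colored_pixels_inside grid rectangle (count_colored_pixels_inside grid rectangle)

-- ===== LEMMAS AND PROOFS =====

-- number of entries ≠ 1 in a list, as an Int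
def pvN (l : List Int) : Int := ((l.countP (fun v => decide (v ≠ 1)) : Nat) : Int)

theorem pvN_nil : pvN [] = 0 := rfl

theorem pvN_cons (v : Int) (l : List Int) :
    pvN (v :: l) = (if v ≠ 1 then 1 else 0) + pvN l := by
  by_cases h : v = 1 <;> simp [pvN, h] <;> omega

-- A's inner loop over one row adds the number of ≠1-cells of the visited slice.
theorem pv_inner (row : List Int) (b : Int) :
    ∀ n : Nat, ∀ a acc : Int, 0 ≤ a → (b - a).toNat = n → (a < b → b ≤ (row.length : Int)) →
    (PySem.List.pyRange a b 1).foldl (fun count c =>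
        if PySem.List.pyGetD row c 1 ≠ 1 then count + 1 else count) acc
      = acc + pvN ((row.drop a.toNat).take (b.toNat - a.toNat)) := by
  intro n
  induction n with
  | zero =>
    intro a acc ha hn _
    have hba : b ≤ a := by omega
    rw [PySem.List.pyRange_one_eq_nil hba]
    have h0 : b.toNat - a.toNat = 0 := by omega
    simp [h0, pvN_nil]
  | succ k ih =>
    intro a acc ha hn hlen
    have hab : a < b := by omega
    have hlt : a.toNat < row.length := by
      have := hlen hab; omega
    rw [PySem.List.pyRange_one_cons hab, List.foldl_cons]
    have hget : PySem.List.pyGetD row a 1 = row[a.toNat]'hlt :=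
      PySem.List.pyGetD_eq_getElem row 1 ha (by omega)
    rw [hget]
    rw [List.drop_eq_getElem_cons hlt]
    have hk : b.toNat - a.toNat = k + 1 := by omega
    have hk' : b.toNat - (a + 1).toNat = k := by omega
    rw [hk, List.take_succ_cons, pvN_cons]
    have hrec := ih (a + 1) (if row[a.toNat] ≠ 1 then acc + 1 else acc) (by omega) (by omega)
      (fun _ => hlen hab)
    rw [hrec, hk']
    have ht : (a + 1).toNat = a.toNat + 1 := by omega
    rw [ht]
    by_cases h1 : row[a.toNat] = 1 <;> simp [h1] <;> omega

-- every scanl starts with its seed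
theorem pv_scanl_head {α β : Type} (f : β → α → β) (s : β) (l : List α) :
    List.scanl f s l = s :: (List.scanl f s l).tail := by
  cases l <;> simp [List.scanl]

-- B's inner foldl builds exactly the scanl of running (≠1)-counts.
theorem pv_pref_foldl : ∀ (row p : List Int) (s : Int), p.getLast? = some s →
    row.foldl (fun (pref : List Int) v =>
        pref ++ [PySem.List.pyGetD pref (-1) 0 + (if v ≠ 1 then 1 else 0)]) p
      = p ++ (List.scanl (fun a v => a + (if v ≠ 1 then 1 else 0)) s row).tail := by
  intro row
  induction row with
  | nil => intro p s _; simp [List.scanl]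
  | cons v t ih =>
    intro p s hp
    have hne : p ≠ [] := by intro h; subst h; simp at hp
    have hlast : PySem.List.pyGetD p (-1) 0 = s := by
      rw [PySem.List.pyGetD_neg_one p 0 hne]
      rw [List.getLast?_eq_some_getLast hne] at hp
      exact Option.some.inj hp
    rw [List.foldl_cons, hlast]
    rw [ih (p ++ [s + if v ≠ 1 then 1 else 0]) (s + if v ≠ 1 then 1 else 0)
      (by simp)]
    rw [List.scanl_cons]
    rw [pv_scanl_head (fun a v => a + (if v ≠ 1 then 1 else 0)) (s + if v ≠ 1 then 1 else 0) t]
    simp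

-- the i-th entry of the scanl is the seed plus the (≠1)-count of the first i cells
theorem pv_scanl_getD : ∀ (row : List Int) (s : Int) (i : Nat), i ≤ row.length →
    (List.scanl (fun a v => a + (if v ≠ 1 then 1 else 0)) s row).getD i 0
      = s + pvN (row.take i) := by
  intro row
  induction row with
  | nil =>
    intro s i hi
    have h0 : i = 0 := Nat.le_zero.mp hi
    subst h0
    simp [List.scanl, pvN_nil]
  | cons v t ih =>
    intro s i hi
    rw [List.scanl_cons]
    cases i with
    | zero => simp [pvN_nil]
    | succ j =>
      have := ih (s + if v ≠ 1 then 1 else 0) j (by simpa using hi)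
      simp only [List.getD_cons_succ, List.take_succ_cons, pvN_cons]
      rw [this]; ring

-- ≠1-counts of prefixes subtract to the ≠1-count of the slice between them
theorem pv_N_sub (row : List Int) (a b : Nat) (hab : a ≤ b) :
    pvN (row.take b) - pvN (row.take a) = pvN ((row.drop a).take (b - a)) := by
  have h : row.take b = row.take a ++ (row.drop a).take (b - a) := by
    have hb : a + (b - a) = b := by omega
    conv_lhs => rw [← hb]
    rw [List.take_add]
  rw [h]
  simp [pvN, List.countP_append]

theorem pv_empty_cols (grid : List (List Int)) (min_r min_c max_r max_c : Int)
    (h : max_c < min_c) :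
    count_colored_pixels_inside grid (min_r, min_c, max_r, max_c)
      = count_colored_pixels_inside_alt grid (min_r, min_c, max_r, max_c) := by
  simp only [count_colored_pixels_inside, count_colored_pixels_inside_alt]
  rw [if_pos (Or.inr h)]
  have hin : ∀ (acc r : Int),
      (PySem.List.pyRange min_c (max_c + 1) 1).foldl (fun count c =>
        if PySem.List.pyGetD (PySem.List.pyGetD grid r []) c 1 ≠ 1 then count + 1 else count)
        acc = (fun (acc : Int) (_ : Int) => acc) acc r := by
    intro acc r
    rw [PySem.List.pyRange_one_eq_nil (by omega)]
    rfl
  have hfun : (fun (count : Int) r =>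
      (PySem.List.pyRange min_c (max_c + 1) 1).foldl (fun count c =>
        if PySem.List.pyGetD (PySem.List.pyGetD grid r []) c 1 ≠ 1 then count + 1 else count)
        count) = fun (count : Int) (_ : Int) => count :=
    funext fun acc => funext fun r => hin acc r
  rw [hfun]
  simp

theorem pv_main (grid : List (List Int)) (min_r min_c max_r max_c : Int)
    (hpre : Pre_count_colored_pixels_inside grid (min_r, min_c, max_r, max_c)) :
    count_colored_pixels_inside grid (min_r, min_c, max_r, max_c)
      = count_colored_pixels_inside_alt grid (min_r, min_c, max_r, max_c) := by
  rcases hpre with h | h | ⟨hr0, hr1, hc0, hcols⟩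
  · -- empty row range
    simp only [count_colored_pixels_inside, count_colored_pixels_inside_alt]
    rw [PySem.List.pyRange_one_eq_nil (a := min_r) (b := max_r + 1) (by omega)]
    simp [h]
  · exact pv_empty_cols grid min_r min_c max_r max_c h
  · -- non-empty rectangle inside the grid
    by_cases hrr : max_r < min_r
    · simp only [count_colored_pixels_inside, count_colored_pixels_inside_alt]
      rw [PySem.List.pyRange_one_eq_nil (a := min_r) (b := max_r + 1) (by omega)]
      simp [hrr]
    by_cases hcc : max_c < min_c
    · exact pv_empty_cols grid min_r min_c max_r max_c hcc
    simp only [count_colored_pixels_inside, count_colored_pixels_inside_alt]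
    rw [if_neg (by omega)]
    apply PySem.List.foldl_congr_mem
    intro acc r hrm
    have hrow := hcols r hrm
    set row := PySem.List.pyGetD grid r [] with hrowdef
    -- A side: inner loop = acc + pvN slice
    rw [pv_inner row (max_c + 1) (max_c + 1 - min_c).toNat min_c acc hc0 rfl (by omega)]
    -- B side: prefix list = scanl, entries are prefix counts
    rw [pv_pref_foldl row [0] 0 rfl]
    rw [List.singleton_append, ← pv_scanl_head]
    have hidx : ∀ i : Int, 0 ≤ i → i ≤ (row.length : Int) →
        PySem.List.pyGetD (List.scanl (fun a v => a + (if v ≠ 1 then 1 else 0)) 0 row) i 0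
          = pvN (row.take i.toNat) := by
      intro i h0 hle
      have hi : i = ((i.toNat : Nat) : Int) := by omega
      conv_lhs => rw [hi, PySem.List.pyGetD_natCast]
      rw [pv_scanl_getD row 0 i.toNat (by omega)]
      exact zero_add _
    rw [hidx (max_c + 1) (by omega) (by omega), hidx min_c (by omega) (by omega)]
    have h2 := pv_N_sub row min_c.toNat (max_c + 1).toNat (by omega)
    rw [← h2]
    ring

-- ===== VERDICT (by name: the statement is the Claim_ definition above) =====
theorem count_colored_pixels_inside_spec : Claim_equal_count_colored_pixels_inside := by
  intro grid rectangle _ hpre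
  obtain ⟨min_r, min_c, max_r, max_c⟩ := rectangle
  exact pv_main grid min_r min_c max_r max_c hpre
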